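-- pv_equiv track=rewrite | github.com/MihirRajak91/Try_rag | rag/assembler.py | _drop_contained_blocks
-- ===== SOURCE A (Python) =====
-- from typing import Dict, List
--
-- def _norm_text(s: str) -> str:
--     return " ".join((s or "").strip().split())
--
-- def _drop_contained_blocks(chunks: List[Dict]) -> List[Dict]:
--     normed = [(_norm_text(ch.get("text", "")), ch) for ch in chunks]
--     out: List[Dict] = []
--     for i, (ti, chi) in enumerate(normed):
--         if not ti:
--             continue
--         contained = False
--         for j, (tj, _) in enumerate(normed):
--             if i == j:
--                 continue
--             if len(tj) >= len(ti) and ti in tj: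
--                 contained = True
--                 break
--         if not contained:
--             out.append(chi)
--     return out
-- ===== SOURCE B (Python) =====
-- def _norm_text(s):
--     return " ".join((s or "").strip().split())
--
--
-- def _drop_contained_blocks(chunks):
--     # Different algorithm: group the distinct normalized texts by length and
--     # sweep the length groups once, longest first, maintaining a frontier of
--     # maximal texts (those contained in no strictly longer text).  A text need
--     # only be tested against that frontier: if it is contained in any longer
--     # text it is contained in a maximal one (follow the containment chain
--     # upward; lengths strictly increase, so it ends at a maximal text).
--     # A block is kept iff its text is nonempty, occurs exactly once, and
--     # survives the frontier test.
--     texts = [_norm_text(ch.get("text", "")) for ch in chunks]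
--     cnt = {}
--     for t in texts:
--         cnt[t] = cnt.get(t, 0) + 1
--     by_len = {}
--     for t in cnt:
--         by_len.setdefault(len(t), []).append(t)
--     frontier = []
--     keep = set()
--     for length in sorted(by_len, reverse=True):
--         survivors = [t for t in by_len[length]
--                      if not any(t in m for m in frontier)]
--         for t in survivors:
--             if t and cnt[t] == 1:
--                 keep.add(t)
--         frontier.extend(survivors)
--     return [ch for t, ch in zip(texts, chunks) if t in keep]
-- ===== Notes on version B (the rewrite author's own statement) =====
-- stated objective: alternative
-- what changed: Replaces A's all-pairs indexed containment scan by a sort-then-sweep: the distinct normalized texts are bucketed by length, the length groups are processed longest-first, and each text is tested only against an incrementally maintained frontier of maximal texts (texts contained in no strictly longer text); duplicates are detected by a count table instead of a second scan.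
import Mathlib
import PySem

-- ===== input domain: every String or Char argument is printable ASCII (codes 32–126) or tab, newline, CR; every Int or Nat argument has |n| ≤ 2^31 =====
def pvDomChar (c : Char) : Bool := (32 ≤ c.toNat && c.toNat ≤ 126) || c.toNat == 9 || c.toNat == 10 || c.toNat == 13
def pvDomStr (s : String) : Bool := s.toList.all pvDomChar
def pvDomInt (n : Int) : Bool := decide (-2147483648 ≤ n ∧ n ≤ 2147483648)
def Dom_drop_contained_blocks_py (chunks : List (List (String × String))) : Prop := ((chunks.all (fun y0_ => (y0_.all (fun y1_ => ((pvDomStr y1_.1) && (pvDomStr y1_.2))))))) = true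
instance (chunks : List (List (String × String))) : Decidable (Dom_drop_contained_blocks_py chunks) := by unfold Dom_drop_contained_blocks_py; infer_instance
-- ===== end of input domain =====

-- B replaces A's all-pairs containment scan by a single descending sweep over
-- the length groups of the distinct normalized texts, testing each text only
-- against a maintained frontier of maximal texts; the two agree on every input.

-- ===== PORT A =====
-- _norm_text: " ".join((s or "").strip().split()); '(s or "")' is the identity on str (s is falsy only when s == "").
def pvNormText (s : String) : String :=
  PySem.Str.join " " (PySem.Str.split₀ (PySem.Str.strip s))

-- _norm_text(ch.get("text", ""))
def pvText (ch : List (String × String)) : String :=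
  pvNormText ((PySem.Dict.mk ch).getD "text" "")

def drop_contained_blocks_py (chunks : List (List (String × String))) : List (List (String × String)) :=
  let normed := chunks.map (fun ch => (pvText ch, ch))
  (PySem.List.enumerate normed).foldl
    (fun out p =>
      if p.2.1 = "" then out
      else
        -- inner for-loop with break: contained ⟺ some j ≠ i has len(tj) >= len(ti) and ti in tj
        if (PySem.List.enumerate normed).any (fun q =>
              decide (q.1 ≠ p.1) &&
              decide (PySem.Str.len p.2.1 ≤ PySem.Str.len q.2.1) &&
              PySem.Str.isIn p.2.1 q.2.1) then out
        else out ++ [p.2.2]) []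

-- ===== PORT B =====
def drop_contained_blocks_py_alt (chunks : List (List (String × String))) : List (List (String × String)) :=
  let texts := chunks.map pvText
  let cnt := texts.foldl (fun d t => d.insert t (d.getD t 0 + 1)) (PySem.Dict.empty : PySem.Dict String Int)
  -- by_len.setdefault(len(t), []).append(t) over the distinct texts
  let byLen := cnt.keys.foldl
      (fun (d : PySem.Dict Int (List String)) t => d.modify (PySem.Str.len t) [] (· ++ [t]))
      (PySem.Dict.empty : PySem.Dict Int (List String))
  -- sweep the lengths, longest first, carrying (frontier, keep)
  let st := (PySem.List.sorted byLen.keys (fun x => x) true).foldl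
      (fun (st : List String × PySem.Set String) length =>
        ((st.1 ++ (byLen.getD length []).filter (fun t => !(st.1.any (fun m => PySem.Str.isIn t m)))),
         ((byLen.getD length []).filter (fun t => !(st.1.any (fun m => PySem.Str.isIn t m)))).foldl
           (fun k t => if t ≠ "" ∧ cnt.getD t 0 = 1 then PySem.Set.add k t else k) st.2))
      (([] : List String), (PySem.Set.empty : PySem.Set String))
  ((texts.zip chunks).filter (fun p => PySem.Set.contains st.2 p.1)).map (·.2)

-- ===== PRECONDITION & SPEC =====
def Spec_drop_contained_blocks_py (chunks : List (List (String × String))) (out : List (List (String × String))) : Prop := out = drop_contained_blocks_py_alt chunks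
instance (chunks : List (List (String × String))) (out : List (List (String × String))) : Decidable (Spec_drop_contained_blocks_py chunks out) := by unfold Spec_drop_contained_blocks_py; infer_instance

-- ===== CLAIM (what is proved, stated in full; the proofs are below) =====
def Claim_equal_drop_contained_blocks_py : Prop := ∀ (chunks : List (List (String × String))), Dom_drop_contained_blocks_py chunks → Spec_drop_contained_blocks_py chunks (drop_contained_blocks_py chunks)

-- ===== LEMMAS AND PROOFS =====

-- 'x is contained in a strictly longer text of texts'
def pvContainedB (texts : List String) (t : String) : Bool :=
  texts.any (fun u => decide (PySem.Str.len t < PySem.Str.len u) && PySem.Str.isIn t u)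

theorem pvContainedB_iff (texts : List String) (t : String) :
    pvContainedB texts t = true
      ↔ ∃ u ∈ texts, PySem.Str.len t < PySem.Str.len u ∧ PySem.Str.isIn t u = true := by
  simp [pvContainedB]

-- the combined keep condition both programs compute
def pvKeepAllB (texts : List String) (t : String) : Bool :=
  decide (t ≠ "") && decide (texts.count t = 1) && !pvContainedB texts t

-- the survivors of one length group against a frontier
def pvSurv (texts : List String) (frontier : List String) (L : Int) : List String :=
  ((PySem.Set.ofList texts).filter (fun t => PySem.Str.len t == L)).filter
    (fun t => !(frontier.any (fun m => PySem.Str.isIn t m)))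

-- chunks.map (fun ch => (f ch, ch)) is (chunks.map f).zip chunks
theorem pv_map_pair {α β : Type} (f : α → β) (l : List α) :
    l.map (fun x => (f x, x)) = (l.map f).zip l := by
  induction l with
  | nil => rfl
  | cons x xs ih => simp [ih]

-- A's loop shape: skip on P, skip on Q, else append — a filter by ¬P ∧ ¬Q
theorem pv_A_foldl {α β : Type} (P Q : α → Prop) [DecidablePred P] [DecidablePred Q]
    (f : α → β) (l : List α) (acc : List β) :
    l.foldl (fun out x => if P x then out else if Q x then out else out ++ [f x]) acc
    = acc ++ (l.filter (fun x => !decide (P x) && !decide (Q x))).map f := by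
  induction l generalizing acc with
  | nil => simp
  | cons x xs ih =>
    simp only [List.foldl_cons, List.filter_cons]
    by_cases hP : P x <;> by_cases hQ : Q x <;> simp [hP, hQ, ih]

-- filtering an enumerate by an index-aware predicate that agrees pointwise with
-- an index-free one, then projecting, is a plain filter
theorem pv_filter_enumerate {α : Type} (l : List α) (s : Int) (P : Int × α → Bool) (Q : α → Bool)
    (h : ∀ (k : Nat) (hk : k < l.length), P (s + k, l[k]) = Q l[k]) :
    ((PySem.List.enumerate l s).filter P).map (·.2) = l.filter Q := by
  induction l generalizing s with
  | nil => rfl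
  | cons x xs ih =>
      have h0 : P (s, x) = Q x := by simpa using h 0 (by simp)
      have ih' := ih (s + 1) (fun k hk => by
        have := h (k + 1) (by simpa using Nat.succ_lt_succ hk)
        simpa [add_assoc, add_comm, add_left_comm] using this)
      simp only [PySem.List.enumerate_cons, List.filter_cons, h0]
      by_cases hq : Q x = true
      · simp [hq, ih']
      · simp only [Bool.not_eq_true] at hq
        simp [hq, ih']

-- two occurrences iff an occurrence at another index
theorem pv_two_le_count {α : Type} [DecidableEq α] (l : List α) (k : Nat) (hk : k < l.length) :
    2 ≤ l.count l[k] ↔ ∃ j, ∃ hj : j < l.length, j ≠ k ∧ l[j] = l[k] := by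
  induction l generalizing k with
  | nil => simp at hk
  | cons x xs ih =>
    match k with
    | 0 =>
      simp only [List.getElem_cons_zero, List.count_cons_self]
      constructor
      · intro h
        have hx : x ∈ xs := List.count_pos_iff.mp (by omega)
        obtain ⟨j', hj', heq⟩ := List.mem_iff_getElem.mp hx
        exact ⟨j' + 1, by simpa using Nat.succ_lt_succ hj', by simp, by simpa using heq⟩
      · rintro ⟨j, hj, hj0, heq⟩
        match j, hj0 with
        | j' + 1, _ =>
          rw [List.getElem_cons_succ] at heq
          have hx : x ∈ xs := heq ▸ List.getElem_mem _
          have := List.count_pos_iff.mpr hx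
          omega
    | k' + 1 =>
      have hk' : k' < xs.length := by simpa using hk
      simp only [List.getElem_cons_succ]
      by_cases hx : x = xs[k']
      · constructor
        · intro _
          exact ⟨0, by simp, by simp, by simpa using hx⟩
        · intro _
          have := List.count_pos_iff.mpr (List.getElem_mem hk')
          rw [← hx, List.count_cons_self, hx]
          omega
      · rw [List.count_cons_of_ne hx, ih k' hk']
        constructor
        · rintro ⟨j', hj', hne, heq⟩
          exact ⟨j' + 1, by simpa using Nat.succ_lt_succ hj', by omega, by simpa using heq⟩
        · rintro ⟨j, hj, hne, heq⟩
          match j with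
          | 0 =>
            rw [List.getElem_cons_zero] at heq
            exact absurd heq hx
          | j' + 1 =>
            rw [List.getElem_cons_succ] at heq
            exact ⟨j', by simpa using hj, by omega, heq⟩

-- the heart of the A-side: A's per-index containment equals count/longer-text
theorem pv_core (texts : List String) (k : Nat) (hk : k < texts.length) :
    ((∃ j, ∃ hj : j < texts.length, j ≠ k ∧
        PySem.Str.len texts[k] ≤ PySem.Str.len texts[j] ∧ PySem.Str.isIn texts[k] texts[j] = true)
      ↔ (texts.count texts[k] ≠ 1 ∨
          ∃ u ∈ texts, PySem.Str.len texts[k] < PySem.Str.len u ∧ PySem.Str.isIn texts[k] u = true)) := by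
  have hone : 1 ≤ texts.count texts[k] := List.count_pos_iff.mpr (List.getElem_mem hk)
  constructor
  · rintro ⟨j, hj, hjk, hle, hin⟩
    rcases lt_or_eq_of_le hle with hlt | heq
    · exact Or.inr ⟨texts[j], List.getElem_mem hj, hlt, hin⟩
    · left
      have hlen : texts[k].toList.length = texts[j].toList.length := by
        rw [PySem.Str.len_eq, PySem.Str.len_eq] at heq
        exact_mod_cast heq
      have : texts[k].toList = texts[j].toList :=
        List.IsInfix.eq_of_length ((PySem.Str.isIn_iff_infix _ _).mp hin) hlen
      have hje : texts[j] = texts[k] := (String.toList_inj.mp this).symm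
      have h2 : 2 ≤ texts.count texts[k] :=
        (pv_two_le_count texts k hk).mpr ⟨j, hj, hjk, hje⟩
      omega
  · rintro (hcnt | ⟨u, hu, hlt, hin⟩)
    · have h2 : 2 ≤ texts.count texts[k] := by omega
      obtain ⟨j, hj, hjk, hje⟩ := (pv_two_le_count texts k hk).mp h2
      refine ⟨j, hj, hjk, by rw [hje], ?_⟩
      rw [hje]
      exact (PySem.Str.isIn_iff_infix _ _).mpr (List.infix_refl _)
    · obtain ⟨j, hj, hju⟩ := List.mem_iff_getElem.mp hu
      have hjk : j ≠ k := by
        rintro rfl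
        rw [← hju] at hlt
        exact lt_irrefl _ hlt
      exact ⟨j, hj, hjk, by rw [hju]; exact le_of_lt hlt, by rw [hju]; exact hin⟩

-- A's kept-at-index-k condition, as the index-free pvKeepAllB
theorem pv_pointwise (texts : List String) (chunks : List (List (String × String)))
    (hlen : texts.length = chunks.length)
    (k : Nat) (hk : k < (texts.zip chunks).length) :
    (!decide ((texts.zip chunks)[k].1 = "") &&
      !decide (((PySem.List.enumerate (texts.zip chunks)).any (fun q =>
          decide (q.1 ≠ ((0 : Int) + (k : Int))) &&
          decide (PySem.Str.len (texts.zip chunks)[k].1 ≤ PySem.Str.len q.2.1) &&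
          PySem.Str.isIn (texts.zip chunks)[k].1 q.2.1)) = true))
    = pvKeepAllB texts (texts.zip chunks)[k].1 := by
  have hkt : k < texts.length := by
    rw [List.length_zip] at hk
    omega
  have hkc : k < chunks.length := by omega
  have hz : (texts.zip chunks)[k] = (texts[k], chunks[k]) := List.getElem_zip
  rw [hz]
  have hA : ((PySem.List.enumerate (texts.zip chunks)).any (fun q =>
          decide (q.1 ≠ ((0 : Int) + (k : Int))) &&
          decide (PySem.Str.len (texts[k], chunks[k]).1 ≤ PySem.Str.len q.2.1) &&
          PySem.Str.isIn (texts[k], chunks[k]).1 q.2.1)) = true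
      ↔ (∃ j, ∃ hj : j < texts.length, j ≠ k ∧
          PySem.Str.len texts[k] ≤ PySem.Str.len texts[j] ∧ PySem.Str.isIn texts[k] texts[j] = true) := by
    simp only [List.any_eq_true, PySem.List.mem_enumerate_iff, Bool.and_eq_true, decide_eq_true_eq]
    constructor
    · rintro ⟨q, ⟨j, hj, rfl⟩, ⟨hne, hle⟩, hin⟩
      have hjt : j < texts.length := by rw [List.length_zip] at hj; omega
      have hjc : j < chunks.length := by omega
      have hzq : (texts.zip chunks)[j] = (texts[j], chunks[j]) := List.getElem_zip
      rw [hzq] at hle hin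
      refine ⟨j, hjt, ?_, hle, hin⟩
      intro h
      subst h
      exact hne rfl
    · rintro ⟨j, hj, hne, hle, hin⟩
      have hjc : j < chunks.length := by omega
      have hjz : j < (texts.zip chunks).length := by rw [List.length_zip]; omega
      have hzq : (texts.zip chunks)[j] = (texts[j], chunks[j]) := List.getElem_zip
      refine ⟨((0 : Int) + (j : Int), (texts.zip chunks)[j]), ⟨j, hjz, rfl⟩, ⟨?_, ?_⟩, ?_⟩
      · simpa using fun h => hne (by exact_mod_cast h)
      · rw [hzq]; exact hle
      · rw [hzq]; exact hin
  rw [Bool.eq_iff_iff]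
  simp only [Bool.and_eq_true, Bool.not_eq_true', decide_eq_false_iff_not,
    Bool.not_eq_true, pvKeepAllB, Bool.and_eq_true, decide_eq_true_eq]
  rw [Bool.eq_false_iff, Ne, hA, pv_core texts k hkt]
  constructor
  · rintro ⟨ht, hno⟩
    refine ⟨⟨ht, ?_⟩, ?_⟩
    · by_contra hc
      exact hno (Or.inl hc)
    · rw [Bool.eq_false_iff, Ne, pvContainedB_iff]
      intro hex
      exact hno (Or.inr hex)
  · rintro ⟨⟨ht, hc⟩, hnb⟩
    rw [Bool.eq_false_iff, Ne, pvContainedB_iff] at hnb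
    exact ⟨ht, fun h => h.elim (fun h1 => h1 hc) (fun h2 => hnb h2)⟩

-- containment chains end at a maximal text (lengths strictly increase)
theorem pv_chain (texts : List String) (k : Nat) :
    ∀ t, t ∈ texts → (∀ u ∈ texts, u.toList.length ≤ t.toList.length + k) →
    pvContainedB texts t = true →
    ∃ m ∈ texts, pvContainedB texts m = false ∧
      PySem.Str.len t < PySem.Str.len m ∧ PySem.Str.isIn t m = true := by
  induction k with
  | zero =>
    intro t _ hbd hc
    obtain ⟨u, hu, hlt, _⟩ := (pvContainedB_iff texts t).mp hc
    rw [PySem.Str.len_eq, PySem.Str.len_eq] at hlt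
    have : t.toList.length < u.toList.length := by exact_mod_cast hlt
    have := hbd u hu
    omega
  | succ k ih =>
    intro t ht hbd hc
    obtain ⟨u, hu, hlt, hin⟩ := (pvContainedB_iff texts t).mp hc
    have hltn : t.toList.length < u.toList.length := by
      rw [PySem.Str.len_eq, PySem.Str.len_eq] at hlt
      exact_mod_cast hlt
    by_cases hcu : pvContainedB texts u = true
    · obtain ⟨m, hm, hmax, hlt2, hin2⟩ := ih u hu (fun v hv => by have := hbd v hv; omega) hcu
      refine ⟨m, hm, hmax, lt_trans hlt hlt2, ?_⟩
      rw [PySem.Str.isIn_iff_infix] at hin hin2 ⊢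
      exact List.IsInfix.trans hin hin2
    · exact ⟨u, hu, by simpa using hcu, hlt, hin⟩

theorem pv_contained_maximal (texts : List String) (t : String) (ht : t ∈ texts)
    (hc : pvContainedB texts t = true) :
    ∃ m ∈ texts, pvContainedB texts m = false ∧
      PySem.Str.len t < PySem.Str.len m ∧ PySem.Str.isIn t m = true := by
  refine pv_chain texts ((texts.map (fun u => u.toList.length)).sum) t ht (fun u hu => ?_) hc
  have : u.toList.length ≤ (texts.map (fun u => u.toList.length)).sum :=
    List.single_le_sum (fun x _ => Nat.zero_le x) _ (List.mem_map_of_mem hu)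
  omega

-- by_len's group at L is the distinct texts of length L, in order
theorem pv_byLen_getD (keys : List String) (L : Int) :
    (keys.foldl (fun (d : PySem.Dict Int (List String)) t =>
        d.modify (PySem.Str.len t) [] (· ++ [t])) PySem.Dict.empty).getD L []
      = keys.filter (fun t => PySem.Str.len t == L) := by
  have h1 : (keys.map (fun t => (PySem.Str.len t, t))).foldl
      (fun (d : PySem.Dict Int (List String)) p => d.modify p.1 [] (· ++ [p.2]))
      PySem.Dict.empty
      = keys.foldl (fun (d : PySem.Dict Int (List String)) t =>
          d.modify (PySem.Str.len t) [] (· ++ [t])) PySem.Dict.empty := by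
    rw [List.foldl_map]
  rw [← h1, PySem.Dict.getD_foldl_modify_append]
  simp [List.filter_map, List.map_map, Function.comp_def, pysem]

theorem pv_byLen_keys (keys : List String) :
    (keys.foldl (fun (d : PySem.Dict Int (List String)) t =>
        d.modify (PySem.Str.len t) [] (· ++ [t])) PySem.Dict.empty).keys
      = PySem.Set.ofList (keys.map PySem.Str.len) := by
  rw [PySem.Dict.keys_foldl_modify_key keys PySem.Str.len [] (fun _ t v => v ++ [t])]
  rfl

-- the descending sweep keeps exactly the nonempty, unique, uncontained texts
theorem pv_sweep (texts : List String) :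
    ∀ (Ls : List Int) (frontier : List String) (keep : PySem.Set String),
    Ls.Pairwise (fun a b => b < a) →
    (∀ m, m ∈ frontier ↔ m ∈ texts ∧ PySem.Str.len m ∉ Ls ∧ pvContainedB texts m = false) →
    (∀ L ∈ Ls, ∀ m ∈ frontier, L < PySem.Str.len m) →
    (∀ t, t ∈ keep ↔ t ∈ texts ∧ PySem.Str.len t ∉ Ls ∧ t ≠ "" ∧
        texts.count t = 1 ∧ pvContainedB texts t = false) →
    ∀ t, (t ∈ (Ls.foldl (fun (st : List String × PySem.Set String) L =>
        (st.1 ++ pvSurv texts st.1 L,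
         (pvSurv texts st.1 L).foldl
           (fun k x => if x ≠ "" ∧ (PySem.Dict.counter texts).getD x 0 = 1 then PySem.Set.add k x else k)
           st.2)) (frontier, keep)).2
      ↔ t ∈ texts ∧ t ≠ "" ∧ texts.count t = 1 ∧ pvContainedB texts t = false) := by
  intro Ls
  induction Ls with
  | nil =>
    intro frontier keep _ _ _ hkeep t
    simpa using hkeep t
  | cons L Ls' ih =>
    intro frontier keep hdesc hfr hfr3 hkeep t
    have hLnot : L ∉ Ls' := by
      intro h
      exact lt_irrefl L ((List.pairwise_cons.mp hdesc).1 L h)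
    have hLgt : ∀ L'' ∈ Ls', L'' < L := (List.pairwise_cons.mp hdesc).1
    -- survivors of this group are the maximal texts of length L
    have hsurv : ∀ x, x ∈ pvSurv texts frontier L
        ↔ x ∈ texts ∧ PySem.Str.len x = L ∧ pvContainedB texts x = false := by
      intro x
      unfold pvSurv
      simp only [List.mem_filter, PySem.Set.mem_ofList, Bool.not_eq_eq_eq_not, Bool.not_true,
        List.any_eq_false, beq_iff_eq]
      constructor
      · rintro ⟨⟨hx, hlen⟩, hno⟩
        refine ⟨hx, hlen, ?_⟩
        rw [Bool.eq_false_iff, Ne]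
        intro hc
        obtain ⟨m, hm, hmax, hlt, hin⟩ := pv_contained_maximal texts x hx hc
        have hmnot : PySem.Str.len m ∉ L :: Ls' := by
          intro hmem
          rcases List.mem_cons.mp hmem with h | h
          · rw [hlen] at hlt; omega
          · have := hLgt _ h; rw [hlen] at hlt; omega
        have hmf : m ∈ frontier := (hfr m).mpr ⟨hm, hmnot, hmax⟩
        exact hno m hmf hin
      · rintro ⟨hx, hlen, hnc⟩
        refine ⟨⟨hx, hlen⟩, fun m hmf => ?_⟩
        intro hin
        obtain ⟨hm, _, _⟩ := (hfr m).mp hmf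
        have hlt : L < PySem.Str.len m := hfr3 L (List.mem_cons_self) m hmf
        have : pvContainedB texts x = true :=
          (pvContainedB_iff texts x).mpr ⟨m, hm, by rw [hlen]; exact hlt, hin⟩
        rw [this] at hnc
        exact Bool.true_eq_false.mp hnc
    simp only [List.foldl_cons]
    refine ih (frontier ++ pvSurv texts frontier L) _ (List.pairwise_cons.mp hdesc).2 ?_ ?_ ?_ t
    · -- frontier invariant
      intro m
      rw [List.mem_append, hfr m, hsurv m]
      constructor
      · rintro (⟨hm, hnot, hmax⟩ | ⟨hm, hlen, hmax⟩)
        · exact ⟨hm, fun h => hnot (List.mem_cons_of_mem _ h), hmax⟩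
        · exact ⟨hm, by rw [hlen]; exact hLnot, hmax⟩
      · rintro ⟨hm, hnot', hmax⟩
        by_cases hlen : PySem.Str.len m = L
        · exact Or.inr ⟨hm, hlen, hmax⟩
        · refine Or.inl ⟨hm, ?_, hmax⟩
          intro h
          rcases List.mem_cons.mp h with h | h
          · exact hlen h
          · exact hnot' h
    · -- length bound
      intro L'' hL'' m hm
      rcases List.mem_append.mp hm with h | h
      · exact hfr3 L'' (List.mem_cons_of_mem _ hL'') m h
      · obtain ⟨_, hlen, _⟩ := (hsurv m).mp h
        rw [hlen]
        exact hLgt L'' hL''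
    · -- keep invariant
      intro x
      rw [PySem.List.foldl_ite_eq_foldl_filter
        (fun x => x ≠ "" ∧ (PySem.Dict.counter texts).getD x 0 = 1) PySem.Set.add]
      have hupd : ((pvSurv texts frontier L).filter
            (fun x => decide (x ≠ "" ∧ (PySem.Dict.counter texts).getD x 0 = 1))).foldl
            PySem.Set.add keep
          = PySem.Set.update keep ((pvSurv texts frontier L).filter
            (fun x => decide (x ≠ "" ∧ (PySem.Dict.counter texts).getD x 0 = 1))) := rfl
      rw [hupd, PySem.Set.mem_update, hkeep x, List.mem_filter]
      have hcnt : ((PySem.Dict.counter texts).getD x 0 = 1) ↔ texts.count x = 1 := by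
        rw [PySem.Dict.getD_counter]
        exact_mod_cast Iff.rfl
      constructor
      · rintro (⟨hx, hnot, hrest⟩ | ⟨hs, hcond⟩)
        · exact ⟨hx, fun h => hnot (List.mem_cons_of_mem _ h), hrest⟩
        · obtain ⟨hx, hlen, hmax⟩ := (hsurv x).mp hs
          simp only [decide_eq_true_eq] at hcond
          exact ⟨hx, by rw [hlen]; exact hLnot, hcond.1, hcnt.mp hcond.2, hmax⟩
      · rintro ⟨hx, hnot', hne, hct, hmax⟩
        by_cases hlen : PySem.Str.len x = L
        · refine Or.inr ⟨(hsurv x).mpr ⟨hx, hlen, hmax⟩, ?_⟩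
          simp only [decide_eq_true_eq]
          exact ⟨hne, hcnt.mpr hct⟩
        · refine Or.inl ⟨hx, ?_, hne, hct, hmax⟩
          intro h
          rcases List.mem_cons.mp h with h | h
          · exact hlen h
          · exact hnot' h

-- ===== VERDICT (by name: the statement is the Claim_ definition above) =====
theorem drop_contained_blocks_py_spec : Claim_equal_drop_contained_blocks_py := by
  intro chunks _
  unfold Spec_drop_contained_blocks_py drop_contained_blocks_py drop_contained_blocks_py_alt
  simp only [pv_map_pair pvText chunks]
  set texts := chunks.map pvText with htexts
  -- the A side is the filter by pvKeepAllB
  have hAside :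
      (PySem.List.enumerate (texts.zip chunks)).foldl
        (fun out p =>
          if p.2.1 = "" then out
          else
            if (PySem.List.enumerate (texts.zip chunks)).any (fun q =>
                  decide (q.1 ≠ p.1) &&
                  decide (PySem.Str.len p.2.1 ≤ PySem.Str.len q.2.1) &&
                  PySem.Str.isIn p.2.1 q.2.1) then out
            else out ++ [p.2.2]) []
      = ((texts.zip chunks).filter (fun p => pvKeepAllB texts p.1)).map (·.2) := by
    refine Eq.trans (pv_A_foldl (fun p => p.2.1 = "")
        (fun p => ((PySem.List.enumerate (texts.zip chunks)).any (fun q =>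
            decide (q.1 ≠ p.1) &&
            decide (PySem.Str.len p.2.1 ≤ PySem.Str.len q.2.1) &&
            PySem.Str.isIn p.2.1 q.2.1)) = true)
        (fun p => p.2.2) (PySem.List.enumerate (texts.zip chunks)) []) ?_
    rw [List.nil_append]
    have hm : (fun (p : Int × (String × List (String × String))) => p.2.2)
        = (fun (q : String × List (String × String)) => q.2)
          ∘ (fun (p : Int × (String × List (String × String))) => p.2) := rfl
    rw [hm, ← List.map_map]
    rw [pv_filter_enumerate (texts.zip chunks) 0 _ (fun p => pvKeepAllB texts p.1)
      (fun k hk => pv_pointwise texts chunks (by simp [htexts]) k hk)]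
  rw [hAside]
  -- the B side: identify cnt with counter, byLen's groups, and run the sweep
  have hcnt : texts.foldl (fun d t => d.insert t (d.getD t 0 + 1))
      (PySem.Dict.empty : PySem.Dict String Int) = PySem.Dict.counter texts :=
    PySem.Dict.foldl_insert_getD_add_one_eq_counter texts
  rw [hcnt, PySem.Dict.keys_counter]
  have hgetD : ∀ L : Int,
      ((PySem.Set.ofList texts).foldl (fun (d : PySem.Dict Int (List String)) t =>
        d.modify (PySem.Str.len t) [] (· ++ [t])) PySem.Dict.empty).getD L []
      = (PySem.Set.ofList texts).filter (fun t => PySem.Str.len t == L) :=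
    fun L => pv_byLen_getD (PySem.Set.ofList texts) L
  have hkeys :
      ((PySem.Set.ofList texts).foldl (fun (d : PySem.Dict Int (List String)) t =>
        d.modify (PySem.Str.len t) [] (· ++ [t])) PySem.Dict.empty).keys
      = PySem.Set.ofList ((PySem.Set.ofList texts).map PySem.Str.len) :=
    pv_byLen_keys (PySem.Set.ofList texts)
  -- rewrite the sweep body into pvSurv form
  have hbody : (fun (st : List String × PySem.Set String) (length : Int) =>
      ((st.1 ++ (((PySem.Set.ofList texts).foldl (fun (d : PySem.Dict Int (List String)) t =>
            d.modify (PySem.Str.len t) [] (· ++ [t])) PySem.Dict.empty).getD length []).filter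
            (fun t => !(st.1.any (fun m => PySem.Str.isIn t m)))),
       ((((PySem.Set.ofList texts).foldl (fun (d : PySem.Dict Int (List String)) t =>
            d.modify (PySem.Str.len t) [] (· ++ [t])) PySem.Dict.empty).getD length []).filter
            (fun t => !(st.1.any (fun m => PySem.Str.isIn t m)))).foldl
         (fun k t => if t ≠ "" ∧ (PySem.Dict.counter texts).getD t 0 = 1 then PySem.Set.add k t else k) st.2))
      = (fun (st : List String × PySem.Set String) L =>
        (st.1 ++ pvSurv texts st.1 L,
         (pvSurv texts st.1 L).foldl
           (fun k x => if x ≠ "" ∧ (PySem.Dict.counter texts).getD x 0 = 1 then PySem.Set.add k x else k)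
           st.2)) := by
    funext st L
    rw [hgetD L]
    rfl
  rw [hbody, hkeys]
  -- descending, duplicate-free length list
  set Ls := PySem.List.sorted (PySem.Set.ofList ((PySem.Set.ofList texts).map PySem.Str.len))
      (fun x => x) true with hLs
  have hnodupLs : Ls.Nodup :=
    ((PySem.List.sorted_perm _ _ _).nodup_iff).mpr (PySem.Set.nodup_ofList _)
  have hdesc : Ls.Pairwise (fun a b => b < a) := by
    have h1 : Ls.Pairwise (fun a b => b ≤ a) := PySem.List.sorted_pairwise_rev _ _
    have := List.Pairwise.and h1 hnodupLs
    exact this.imp (fun h => lt_of_le_of_ne h.1 (Ne.symm h.2))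
  have hcover : ∀ u ∈ texts, PySem.Str.len u ∈ Ls := by
    intro u hu
    rw [hLs, PySem.List.mem_sorted, PySem.Set.mem_ofList]
    exact List.mem_map_of_mem ((PySem.Set.mem_ofList _ _).mpr hu)
  have hsweep := pv_sweep texts Ls [] PySem.Set.empty hdesc
    (fun m => by
      constructor
      · intro h; cases h
      · rintro ⟨hm, hnot, _⟩; exact absurd (hcover m hm) hnot)
    (fun _ _ m hm => by cases hm)
    (fun t => by
      constructor
      · intro h; cases h
      · rintro ⟨ht, hnot, _⟩; exact absurd (hcover t ht) hnot)
  -- both filters agree on the zipped list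
  have hcont : ∀ (s : PySem.Set String) (x : String),
      PySem.Set.contains s x = true ↔ x ∈ s := fun s x => by simp [pysem]
  congr 1
  refine List.filter_congr fun p hp => ?_
  obtain ⟨a, b⟩ := p
  have ha : a ∈ texts := (List.of_mem_zip hp).1
  rw [Bool.eq_iff_iff, hcont, hsweep a]
  simp only [pvKeepAllB, Bool.and_eq_true, decide_eq_true_eq, Bool.not_eq_true']
  constructor
  · rintro ⟨⟨h1, h2⟩, h3⟩; exact ⟨ha, h1, h2, h3⟩
  · rintro ⟨_, h1, h2, h3⟩; exact ⟨⟨h1, h2⟩, h3⟩
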